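-- pv_equiv track=rewrite | github.com/Melisov05/leetcode | 0356-line-reflection/solution.py | lineReflection
-- ===== SOURCE A (Python) =====
-- from typing import List
--
-- def lineReflection(coord: List[List[int]]) -> bool:
--     points = set([(x, y) for x, y in coord])
--     min_x = min(x for x, y in points)
--     max_x = max(x for x, y in points)
--
--     sum_x = min_x + max_x
--     for x, y in points:
--         if (sum_x - x, y) not in points:
--             return False
--     return True
-- ===== SOURCE B (Python) =====
-- from typing import List
--
-- def lineReflection(coord: List[List[int]]) -> bool:
--     pts = sorted(set((x, y) for x, y in coord))
--     s = pts[0][0] + pts[-1][0]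
--     return sorted((s - x, y) for x, y in pts) == pts
-- ===== Notes on version B (the rewrite author's own statement) =====
-- stated objective: alternative
-- what changed: B replaces A's hash-set membership loop (mirror-lookup of every point) by sort-then-compare: sort the deduped points once, read min_x/max_x off the first/last element, and decide symmetry as sorted(mirrored points) == sorted points.
import Mathlib
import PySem

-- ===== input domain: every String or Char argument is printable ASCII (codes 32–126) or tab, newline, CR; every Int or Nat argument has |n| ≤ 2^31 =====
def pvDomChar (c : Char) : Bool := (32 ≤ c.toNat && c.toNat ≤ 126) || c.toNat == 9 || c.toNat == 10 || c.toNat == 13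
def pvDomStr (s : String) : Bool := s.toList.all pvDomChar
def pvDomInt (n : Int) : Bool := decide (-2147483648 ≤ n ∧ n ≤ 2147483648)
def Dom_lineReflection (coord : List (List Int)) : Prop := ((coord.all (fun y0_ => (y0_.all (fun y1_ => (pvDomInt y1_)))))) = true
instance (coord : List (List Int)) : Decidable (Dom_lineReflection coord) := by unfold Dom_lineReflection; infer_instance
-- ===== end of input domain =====

-- B replaces A's hash-set membership loop by sort-then-compare: sort the deduped
-- points once, read min_x/max_x off the ends, and test symmetry as
-- sorted(mirrored points) == sorted points (objective: alternative, same result).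

-- ===== PORT A =====
-- 'for x, y in row' unpacking of a 2-element row, shared by both ports
def pvToPt (r : List Int) : Int × Int := (r.getD 0 0, r.getD 1 0)

def lineReflection (coord : List (List Int)) : Bool :=
  let points : PySem.Set (Int × Int) := PySem.Set.ofList (coord.map pvToPt)
  let min_x : Int := (PySem.List.min? (points.map Prod.fst) (fun x => x)).getD 0
  let max_x : Int := (PySem.List.max? (points.map Prod.fst) (fun x => x)).getD 0
  let sum_x := min_x + max_x
  points.all (fun p => PySem.Set.contains points (sum_x - p.1, p.2))

-- ===== PORT B =====
def lineReflection_alt (coord : List (List Int)) : Bool :=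
  let pts := PySem.List.sorted2 (PySem.Set.ofList (coord.map pvToPt)) Prod.fst Prod.snd
  let s := (PySem.List.pyGetD pts 0 ((0 : Int), (0 : Int))).1 + (PySem.List.pyGetD pts (-1) ((0 : Int), (0 : Int))).1
  PySem.List.sorted2 (pts.map (fun p => (s - p.1, p.2))) Prod.fst Prod.snd == pts

-- ===== PRECONDITION & SPEC =====
-- Pre_ excludes exactly the inputs where Python A raises: empty coord (min() of an
-- empty sequence, ValueError) and rows that are not [x, y] pairs (unpacking ValueError).
def Pre_lineReflection (coord : List (List Int)) : Prop :=
  coord ≠ [] ∧ ∀ r ∈ coord, r.length = 2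
instance (coord : List (List Int)) : Decidable (Pre_lineReflection coord) := by
  unfold Pre_lineReflection; infer_instance

def pvWitness_lineReflection : List (List Int) := [[1, 2], [3, 2]]

def Spec_lineReflection (coord : List (List Int)) (out : Bool) : Prop :=
  out = lineReflection_alt coord
instance (coord : List (List Int)) (out : Bool) : Decidable (Spec_lineReflection coord out) := by
  unfold Spec_lineReflection; infer_instance

-- ===== CLAIM =====
def Claim_equal_lineReflection : Prop :=
  ∀ (coord : List (List Int)), Dom_lineReflection coord → Pre_lineReflection coord →
    Spec_lineReflection coord (lineReflection coord)

-- ===== LEMMAS AND PROOFS =====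

-- encode a bounded pair into one Int so that pvK-order is Python's tuple order
def pvK (p : Int × Int) : Int := p.1 * 68719476736 + p.2   -- 2^36

def pvBnd (p : Int × Int) : Prop :=
  -8589934592 ≤ p.1 ∧ p.1 ≤ 8589934592 ∧ -8589934592 ≤ p.2 ∧ p.2 ≤ 8589934592  -- 2^33

lemma pvK_lt_iff (a b : Int × Int) (ha : pvBnd a) (hb : pvBnd b) :
    pvK a < pvK b ↔ (a.1 < b.1 ∨ (¬ b.1 < a.1 ∧ a.2 < b.2)) := by
  unfold pvK pvBnd at *; omega

lemma pvK_inj (a b : Int × Int) (ha : pvBnd a) (hb : pvBnd b) (h : pvK a = pvK b) : a = b := by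
  have h1 : a.1 = b.1 ∧ a.2 = b.2 := by unfold pvK pvBnd at *; omega
  exact Prod.ext h1.1 h1.2

lemma pvK_le_fst (a b : Int × Int) (ha : pvBnd a) (hb : pvBnd b) (h : pvK a ≤ pvK b) :
    a.1 ≤ b.1 := by
  unfold pvK pvBnd at *; omega

lemma pv_insertBy_congr (b₁ b₂ : (Int × Int) → (Int × Int) → Bool) (x : Int × Int)
    (ys : List (Int × Int)) (h : ∀ u ∈ x :: ys, ∀ v ∈ x :: ys, b₁ u v = b₂ u v) :
    PySem.List.insertBy b₁ x ys = PySem.List.insertBy b₂ x ys := by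
  induction ys with
  | nil => rfl
  | cons y ys ih =>
    simp only [PySem.List.insertBy]
    rw [h x (by simp) y (by simp)]
    by_cases hxy : b₂ x y = true
    · simp [hxy]
    · simp only [hxy]
      rw [ih (fun u hu v hv => h u (by simp only [List.mem_cons] at hu ⊢; tauto) v
        (by simp only [List.mem_cons] at hv ⊢; tauto))]

lemma pv_foldl_insertBy_congr (b₁ b₂ : (Int × Int) → (Int × Int) → Bool)
    (xs acc : List (Int × Int))
    (h : ∀ u, (u ∈ xs ∨ u ∈ acc) → ∀ v, (v ∈ xs ∨ v ∈ acc) → b₁ u v = b₂ u v) :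
    xs.foldl (fun acc x => PySem.List.insertBy b₁ x acc) acc
      = xs.foldl (fun acc x => PySem.List.insertBy b₂ x acc) acc := by
  induction xs generalizing acc with
  | nil => rfl
  | cons x xs ih =>
    simp only [List.foldl_cons]
    rw [pv_insertBy_congr b₁ b₂ x acc
      (fun u hu v hv => h u (by simp only [List.mem_cons] at hu ⊢; tauto) v
        (by simp only [List.mem_cons] at hv ⊢; tauto))]
    exact ih (PySem.List.insertBy b₂ x acc) (fun u hu v hv => by
      apply h
      · rcases hu with h' | h'
        · exact Or.inl (List.mem_cons_of_mem x h')
        · rcases (PySem.List.mem_insertBy b₂ x u acc).mp h' with h'' | h''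
          · exact Or.inl (h'' ▸ List.mem_cons_self)
          · exact Or.inr h''
      · rcases hv with h' | h'
        · exact Or.inl (List.mem_cons_of_mem x h')
        · rcases (PySem.List.mem_insertBy b₂ x v acc).mp h' with h'' | h''
          · exact Or.inl (h'' ▸ List.mem_cons_self)
          · exact Or.inr h'')

-- Python's lexicographic tuple sort is, on bounded pairs, the sort by the key pvK
lemma pv_sorted2_eq_sortedK (xs : List (Int × Int)) (h : ∀ p ∈ xs, pvBnd p) :
    PySem.List.sorted2 xs Prod.fst Prod.snd = PySem.List.sorted xs pvK := by
  rw [PySem.List.sorted_eq_foldl_insertBy]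
  show xs.foldl (fun acc x => PySem.List.insertBy
      (fun a b => decide (a.1 < b.1) || (!decide (b.1 < a.1) && decide (a.2 < b.2))) x acc) []
    = _
  apply pv_foldl_insertBy_congr
  intro u hu v hv
  have hu' : pvBnd u := h u (by simpa using hu)
  have hv' : pvBnd v := h v (by simpa using hv)
  have h1 : (decide (u.1 < v.1) || (!decide (v.1 < u.1) && decide (u.2 < v.2)))
      = decide (u.1 < v.1 ∨ (¬ v.1 < u.1 ∧ u.2 < v.2)) := by
    by_cases h1 : u.1 < v.1 <;> by_cases h2 : v.1 < u.1 <;> by_cases h3 : u.2 < v.2 <;>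
      simp [h1, h2, h3]
  rw [h1]
  exact decide_eq_decide.mpr (pvK_lt_iff u v hu' hv').symm

lemma pv_pyGetD_neg_one (l : List (Int × Int)) (h : l ≠ []) (d : Int × Int) :
    PySem.List.pyGetD l (-1) d = l.getLast h := by
  have hl : 1 ≤ l.length := List.length_pos_iff.mpr h
  simp only [PySem.List.pyGetD, PySem.List.pyGet?, PySem.List.pyIdx?]
  rw [List.getLast_eq_getElem]
  simp [hl, List.getElem?_eq_getElem (by omega : l.length - 1 < l.length)]

lemma pv_last_max (l : List (Int × Int)) (key : Int × Int → Int)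
    (hpw : l.Pairwise (fun a b => key a ≤ key b)) (h : l ≠ []) :
    ∀ y ∈ l, key y ≤ key (l.getLast h) := by
  intro y hy
  obtain ⟨i, hi, rfl⟩ := List.mem_iff_getElem.mp hy
  rw [List.getLast_eq_getElem]
  have hlen : 0 < l.length := List.length_pos_iff.mpr h
  rcases Nat.lt_or_ge i (l.length - 1) with hlt | hge
  · exact (List.pairwise_iff_getElem.mp hpw) i (l.length - 1) hi (by omega) hlt
  · have : i = l.length - 1 := by omega
    subst this; exact le_refl _

-- the Dom bound on a raw point, and its relaxation to the sort-key bound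
def pvTight (p : Int × Int) : Prop :=
  -2147483648 ≤ p.1 ∧ p.1 ≤ 2147483648 ∧ -2147483648 ≤ p.2 ∧ p.2 ≤ 2147483648

lemma pvTight_bnd (p : Int × Int) (h : pvTight p) : pvBnd p := by
  unfold pvTight pvBnd at *; omega

-- symmetry of a duplicate-free point set ↔ its mirror image is a permutation of it
lemma pv_perm_iff_closed (L : List (Int × Int)) (hnd : L.Nodup) (f : Int × Int → Int × Int)
    (hinj : Function.Injective f) :
    (L.map f).Perm L ↔ ∀ p ∈ L, f p ∈ L := by
  constructor
  · intro hperm p hp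
    exact hperm.mem_iff.mp (List.mem_map_of_mem hp)
  · intro hcl
    have hsub : L.map f ⊆ L := by
      intro q hq
      obtain ⟨p, hp, rfl⟩ := List.mem_map.mp hq
      exact hcl p hp
    exact (List.subperm_of_subset (hnd.map hinj) hsub).perm_of_length_le (by simp)

-- ===== VERDICT =====
theorem lineReflection_spec : Claim_equal_lineReflection := by
  unfold Claim_equal_lineReflection
  intro coord hdom hpre
  unfold Spec_lineReflection lineReflection lineReflection_alt
  dsimp only
  obtain ⟨hne, -⟩ := hpre
  set L : List (Int × Int) := PySem.Set.ofList (coord.map pvToPt) with hL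
  have htight : ∀ p ∈ L, pvTight p := by
    intro p hp
    rw [hL, PySem.Set.mem_ofList] at hp
    obtain ⟨r, hr, rfl⟩ := List.mem_map.mp hp
    unfold Dom_lineReflection at hdom
    rw [List.all_eq_true] at hdom
    have hrow := hdom r hr
    rw [List.all_eq_true] at hrow
    have h0 : pvDomInt (r.getD 0 0) = true := by
      rcases h : r[0]? with _ | v
      · simp [List.getD, h, pvDomInt]
      · simpa [List.getD, h] using hrow v (List.mem_of_getElem? h)
    have h1 : pvDomInt (r.getD 1 0) = true := by
      rcases h : r[1]? with _ | v
      · simp [List.getD, h, pvDomInt]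
      · simpa [List.getD, h] using hrow v (List.mem_of_getElem? h)
    unfold pvDomInt at h0 h1
    simp only [decide_eq_true_eq] at h0 h1
    unfold pvToPt pvTight
    exact ⟨h0.1, h0.2, h1.1, h1.2⟩
  have hbnd : ∀ p ∈ L, pvBnd p := fun p hp => pvTight_bnd p (htight p hp)
  have hndL : L.Nodup := PySem.Set.nodup_ofList _
  have hLne : L ≠ [] := by
    intro h
    rcases coord with _ | ⟨r, rest⟩
    · exact hne rfl
    · have hm : pvToPt r ∈ L := by rw [hL, PySem.Set.mem_ofList]; simp
      rw [h] at hm; exact absurd hm (List.not_mem_nil)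
  rw [pv_sorted2_eq_sortedK L hbnd]
  set pts := PySem.List.sorted L pvK with hpts
  have hperm : pts.Perm L := PySem.List.sorted_perm L pvK false
  have hptsne : pts ≠ [] := by
    intro h; rw [h] at hperm; exact hLne hperm.symm.eq_nil
  obtain ⟨h0, t, hcons⟩ : ∃ h0 t, pts = h0 :: t := by
    rcases hp : pts with _ | ⟨h0, t⟩
    · exact absurd hp hptsne
    · exact ⟨h0, t, rfl⟩
  obtain ⟨m, hm⟩ : ∃ m, PySem.List.min? (L.map Prod.fst) (fun x => x) = some m := by
    rcases h : PySem.List.min? (L.map Prod.fst) (fun x => x) with _ | m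
    · rw [PySem.List.min?_eq_none_iff] at h
      exact absurd (List.map_eq_nil_iff.mp h) hLne
    · exact ⟨m, rfl⟩
  obtain ⟨M, hM⟩ : ∃ M, PySem.List.max? (L.map Prod.fst) (fun x => x) = some M := by
    rcases h : PySem.List.max? (L.map Prod.fst) (fun x => x) with _ | M
    · rw [PySem.List.max?_eq_none_iff] at h
      exact absurd (List.map_eq_nil_iff.mp h) hLne
    · exact ⟨M, rfl⟩
  have hmem_h0 : h0 ∈ L := hperm.mem_iff.mp (by rw [hcons]; exact List.mem_cons_self)
  have hlast_mem : pts.getLast hptsne ∈ L := hperm.mem_iff.mp (List.getLast_mem hptsne)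
  have hpw_le : pts.Pairwise (fun a b => pvK a ≤ pvK b) := by
    have h := PySem.List.sorted_pairwise L pvK
    rw [← hpts] at h; exact h
  have hhead_le : ∀ y ∈ L, pvK h0 ≤ pvK y :=
    PySem.List.key_head_sorted_le L pvK (hpts.symm.trans hcons)
  have hlast_le : ∀ y ∈ L, pvK y ≤ pvK (pts.getLast hptsne) := fun y hy =>
    pv_last_max pts pvK hpw_le hptsne y (hperm.mem_iff.mpr hy)
  have hm_eq : m = h0.1 := by
    obtain ⟨p, hpL, hpm⟩ := List.mem_map.mp (PySem.List.min?_mem hm)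
    have hle1 : m ≤ h0.1 := PySem.List.min?_isMin hm h0.1 (List.mem_map_of_mem hmem_h0)
    have hle2 : h0.1 ≤ p.1 :=
      pvK_le_fst h0 p (hbnd _ hmem_h0) (hbnd _ hpL) (hhead_le p hpL)
    omega
  have hM_eq : M = (pts.getLast hptsne).1 := by
    obtain ⟨p, hpL, hpm⟩ := List.mem_map.mp (PySem.List.max?_mem hM)
    have hle1 : (pts.getLast hptsne).1 ≤ M :=
      PySem.List.max?_isMax hM (pts.getLast hptsne).1 (List.mem_map_of_mem hlast_mem)
    have hle2 : p.1 ≤ (pts.getLast hptsne).1 :=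
      pvK_le_fst p _ (hbnd _ hpL) (hbnd _ hlast_mem) (hlast_le p hpL)
    omega
  have e0 : PySem.List.pyGetD pts 0 ((0 : Int), (0 : Int)) = h0 := by
    rw [hcons]; simp [pysem]
  have e1 : PySem.List.pyGetD pts (-1) ((0 : Int), (0 : Int)) = pts.getLast hptsne :=
    pv_pyGetD_neg_one pts hptsne _
  rw [hm, hM, e0, e1]
  simp only [Option.getD_some]
  set S : Int := m + M with hS
  have hSalt : h0.1 + (pts.getLast hptsne).1 = S := by rw [hS, hm_eq, hM_eq]
  rw [hSalt]
  set mir : Int × Int → Int × Int := fun p => (S - p.1, p.2) with hmir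
  have hSt : -4294967296 ≤ S ∧ S ≤ 4294967296 := by
    have t1 := htight _ hmem_h0
    have t2 := htight _ hlast_mem
    unfold pvTight at t1 t2
    rw [hS, hm_eq, hM_eq]; omega
  have hbmir : ∀ q ∈ pts.map mir, pvBnd q := by
    intro q hq
    obtain ⟨p, hp, rfl⟩ := List.mem_map.mp hq
    have := htight p (hperm.mem_iff.mp hp)
    unfold pvTight at this
    rw [hmir]; unfold pvBnd; dsimp only; omega
  rw [pv_sorted2_eq_sortedK _ hbmir]
  have hinj : Function.Injective mir := by
    intro a b hab
    rw [hmir] at hab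
    simp only [Prod.mk.injEq] at hab
    exact Prod.ext (by omega) hab.2
  rw [Bool.eq_iff_iff]
  simp only [List.all_eq_true, beq_iff_eq, PySem.Set.contains_iff]
  rw [show (∀ p ∈ L, (S - p.1, p.2) ∈ L) ↔ ∀ p ∈ L, mir p ∈ L from Iff.rfl,
    ← pv_perm_iff_closed L hndL mir hinj]
  constructor
  · intro hP
    apply PySem.List.sorted_eq_of_perm_of_pairwise_lt
    · exact (hperm.trans hP.symm).trans (hperm.symm.map mir)
    · have hnd : pts.Nodup := (hperm.nodup_iff).mpr hndL
      refine List.Pairwise.imp_of_mem ?_ (hpw_le.and hnd)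
      intro a b ha hb hab
      have hba : pvBnd a := hbnd a (hperm.mem_iff.mp ha)
      have hbb : pvBnd b := hbnd b (hperm.mem_iff.mp hb)
      exact lt_of_le_of_ne hab.1 (fun he => hab.2 (pvK_inj a b hba hbb he))
  · intro hEq
    have h1 : (PySem.List.sorted (pts.map mir) pvK).Perm (pts.map mir) :=
      PySem.List.sorted_perm _ pvK false
    rw [hEq] at h1
    exact ((hperm.symm.map mir).trans h1.symm).trans hperm
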